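-- pv_equiv track=rewrite | github.com/TheLitis/structured-latent-hypothesis | src/structured_latent_hypothesis/transfer_criterion.py | abstain_confusion_counts
-- ===== SOURCE A (Python) =====
-- def abstain_confusion_counts(labels: list[bool], predictions: list[bool | None]) -> dict[str, int]:
--     tp = sum(int(label and prediction is True) for label, prediction in zip(labels, predictions))
--     tn = sum(int((not label) and prediction is False) for label, prediction in zip(labels, predictions))
--     fp = sum(int((not label) and prediction is True) for label, prediction in zip(labels, predictions))
--     fn = sum(int(label and prediction is False) for label, prediction in zip(labels, predictions))
--     ap = sum(int(label and prediction is None) for label, prediction in zip(labels, predictions))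
--     an = sum(int((not label) and prediction is None) for label, prediction in zip(labels, predictions))
--     return {"tp": tp, "tn": tn, "fp": fp, "fn": fn, "ap": ap, "an": an}
-- ===== SOURCE B (Python) =====
-- from collections import Counter
--
--
-- def abstain_confusion_counts(labels: list[bool], predictions: list[bool | None]) -> dict[str, int]:
--     def tag(p):
--         if p is True:
--             return 't'
--         if p is False:
--             return 'f'
--         if p is None:
--             return 'n'
--         return '?'
--
--     counts = Counter((bool(label), tag(prediction)) for label, prediction in zip(labels, predictions))
--     return {
--         "tp": counts[(True, 't')],
--         "tn": counts[(False, 'f')],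
--         "fp": counts[(False, 't')],
--         "fn": counts[(True, 'f')],
--         "ap": counts[(True, 'n')],
--         "an": counts[(False, 'n')],
--     }
-- ===== Notes on version B (the rewrite author's own statement) =====
-- stated objective: idiomatic
-- what changed: Replaces six separate scans of zip(labels, predictions) with one pass building a Counter keyed by (bool(label), identity-tag of prediction), followed by six constant-time lookups.
import Mathlib
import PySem

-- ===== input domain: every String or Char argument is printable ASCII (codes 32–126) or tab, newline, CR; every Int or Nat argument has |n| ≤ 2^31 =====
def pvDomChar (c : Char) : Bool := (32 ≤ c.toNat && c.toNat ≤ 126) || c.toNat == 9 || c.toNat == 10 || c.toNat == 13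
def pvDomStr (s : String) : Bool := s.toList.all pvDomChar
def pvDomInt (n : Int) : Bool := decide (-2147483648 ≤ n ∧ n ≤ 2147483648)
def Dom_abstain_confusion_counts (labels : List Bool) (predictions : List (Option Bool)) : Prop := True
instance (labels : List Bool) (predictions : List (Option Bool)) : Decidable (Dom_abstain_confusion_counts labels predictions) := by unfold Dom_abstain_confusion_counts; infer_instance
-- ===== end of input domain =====

-- B replaces A's six separate scans of zip(labels, predictions) by one Counter-building pass plus six lookups (idiomatic; same result).

-- ===== PORT A =====
-- each 'sum(int(cond) for label, prediction in zip(...))' is ported as the sum of the mapped 0/1 list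
def abstain_confusion_counts (labels : List Bool) (predictions : List (Option Bool)) : List (String × Int) :=
  let z := labels.zip predictions
  let tp := (z.map (fun p => if p.1 && p.2 == some true then (1 : Int) else 0)).sum
  let tn := (z.map (fun p => if !p.1 && p.2 == some false then (1 : Int) else 0)).sum
  let fp := (z.map (fun p => if !p.1 && p.2 == some true then (1 : Int) else 0)).sum
  let fn := (z.map (fun p => if p.1 && p.2 == some false then (1 : Int) else 0)).sum
  let ap := (z.map (fun p => if p.1 && p.2 == none then (1 : Int) else 0)).sum
  let an := (z.map (fun p => if !p.1 && p.2 == none then (1 : Int) else 0)).sum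
  [("tp", tp), ("tn", tn), ("fp", fp), ("fn", fn), ("ap", ap), ("an", an)]

-- ===== PORT B =====
-- tag(p): 't' if p is True, 'f' if p is False, 'n' if p is None (the '?' branch is unreachable for Option Bool)
def pvTag (p : Option Bool) : Char :=
  match p with
  | some true => 't'
  | some false => 'f'
  | none => 'n'

def abstain_confusion_counts_alt (labels : List Bool) (predictions : List (Option Bool)) : List (String × Int) :=
  let counts := PySem.Dict.counter ((labels.zip predictions).map (fun p => (p.1, pvTag p.2)))
  [("tp", counts.getD (true, 't') 0),
   ("tn", counts.getD (false, 'f') 0),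
   ("fp", counts.getD (false, 't') 0),
   ("fn", counts.getD (true, 'f') 0),
   ("ap", counts.getD (true, 'n') 0),
   ("an", counts.getD (false, 'n') 0)]

-- ===== PRECONDITION & SPEC =====
def Spec_abstain_confusion_counts (labels : List Bool) (predictions : List (Option Bool)) (out : List (String × Int)) : Prop := out = abstain_confusion_counts_alt labels predictions
instance (labels : List Bool) (predictions : List (Option Bool)) (out : List (String × Int)) : Decidable (Spec_abstain_confusion_counts labels predictions out) := by unfold Spec_abstain_confusion_counts; infer_instance

-- ===== CLAIM (what is proved, stated in full; the proofs are below) =====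
def Claim_equal_abstain_confusion_counts : Prop := ∀ (labels : List Bool) (predictions : List (Option Bool)), Dom_abstain_confusion_counts labels predictions → Spec_abstain_confusion_counts labels predictions (abstain_confusion_counts labels predictions)

-- ===== LEMMAS AND PROOFS =====

-- sum of a 0/1 indicator map is the countP of the condition
theorem pv_sum_indicator {α : Type} (f : α → Bool) (l : List α) :
    (l.map (fun x => if f x then (1 : Int) else 0)).sum = l.countP f := by
  induction l with
  | nil => simp
  | cons x xs ih =>
    simp [List.countP_cons, ih]
    by_cases h : f x <;> simp [h] <;> ring

-- count of a value in a mapped list is the countP of hitting that value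
theorem pv_count_map {α β : Type} [BEq β] (g : α → β) (l : List α) (b : β) :
    (l.map g).count b = l.countP (fun x => g x == b) := by
  induction l with
  | nil => simp
  | cons x xs ih =>
    simp [List.count_cons, List.countP_cons, ih]

-- a Counter lookup equals the indicator sum when the conditions agree pointwise
theorem pv_counter_eq_sum {α : Type} {β : Type} [BEq β] [LawfulBEq β]
    (g : α → β) (b : β) (f : α → Bool) (l : List α)
    (h : ∀ x, (g x == b) = f x) :
    (PySem.Dict.counter (l.map g)).getD b 0 = (l.map (fun x => if f x then (1 : Int) else 0)).sum := by
  rw [PySem.Dict.getD_counter, pv_count_map, pv_sum_indicator]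
  rw [show (fun x => g x == b) = f from funext h]

-- ===== VERDICT (by name: the statement is the Claim_ definition above) =====
theorem abstain_confusion_counts_spec : Claim_equal_abstain_confusion_counts := by
  intro labels predictions _
  unfold Spec_abstain_confusion_counts abstain_confusion_counts abstain_confusion_counts_alt
  simp only []
  refine congrArg₂ _ ?_ (congrArg₂ _ ?_ (congrArg₂ _ ?_ (congrArg₂ _ ?_ (congrArg₂ _ ?_ (congrArg₂ _ ?_ rfl))))) <;>
  · refine congrArg _ (Eq.symm ?_)
    refine pv_counter_eq_sum _ _ _ _ ?_
    rintro ⟨l, (_ | (_ | _))⟩ <;> cases l <;> simp [pvTag]
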